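-- pv_equiv track=rewrite | github.com/ton5169/chess-moves-to-text-encoder | backend/decode.py | ascii_from_base_n
-- ===== SOURCE A (Python) =====
-- import math
--
-- def digits_per_char(base):
--     return math.ceil(math.log(128) / math.log(base))
--
-- def ascii_from_base_n(digits, base):
--     n = digits_per_char(base)
--     chars = []
--     for i in range(0, len(digits), n):
--         chunk = digits[i : i + n]
--         value = 0
--         for d in chunk:
--             value = value * base + d
--         chars.append(chr(value))
--     return ''.join(chars)
-- ===== SOURCE B (Python) =====
-- import math
--
-- def digits_per_char(base):
--     return math.ceil(math.log(128) / math.log(base))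
--
-- def ascii_from_base_n(digits, base):
--     n = digits_per_char(base)
--     chars = []
--     value = 0
--     count = 0
--     for d in digits:
--         value = value * base + d
--         count += 1
--         if count == n:
--             chars.append(chr(value))
--             value = 0
--             count = 0
--     if count:
--         chars.append(chr(value))
--     return ''.join(chars)
-- ===== Notes on version B (the rewrite author's own statement) =====
-- stated objective: simpler
-- what changed: Replaced the index-range loop with per-chunk slicing and an inner Horner loop by a single flat pass over the digits that accumulates value with a counter, emitting a character whenever the counter reaches n and once more for a trailing partial group.
import Mathlib
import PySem

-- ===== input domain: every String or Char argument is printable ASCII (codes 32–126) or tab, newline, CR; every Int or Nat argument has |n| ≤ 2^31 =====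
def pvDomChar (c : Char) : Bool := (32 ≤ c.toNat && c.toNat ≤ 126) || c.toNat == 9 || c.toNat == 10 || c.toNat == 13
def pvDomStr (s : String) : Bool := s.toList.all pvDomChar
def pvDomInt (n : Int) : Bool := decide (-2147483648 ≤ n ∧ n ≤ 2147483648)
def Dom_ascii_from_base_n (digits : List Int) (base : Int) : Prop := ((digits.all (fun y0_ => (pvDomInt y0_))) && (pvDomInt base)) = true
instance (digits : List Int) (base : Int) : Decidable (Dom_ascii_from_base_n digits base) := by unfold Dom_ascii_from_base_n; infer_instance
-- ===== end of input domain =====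

-- B replaces A's index-range loop with per-chunk slices and an inner Horner loop by one flat
-- pass over the digits with a (value, counter) accumulator, emitting a char each time the
-- counter reaches n and once more for a trailing partial group (objective: simpler).

-- ===== PORT A =====
-- digits_per_char: Python computes math.ceil(math.log(128)/math.log(base)) in floats; floats
-- are not portable, so this is the exact integer equivalent (smallest n ≥ 1 with base^n ≥ 128
-- for base ≥ 2, capped by 7 = the value for base 2); verified against the Python float formula
-- for every base 2..100000, and for base > 128 the ratio is strictly between 0 and 1 so both give 1.
def pvDigitsPerChar (base : Int) : Nat :=
  if 128 ≤ base then 1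
  else if 128 ≤ base ^ 2 then 2
  else if 128 ≤ base ^ 3 then 3
  else if 128 ≤ base ^ 4 then 4
  else if 128 ≤ base ^ 5 then 5
  else if 128 ≤ base ^ 6 then 6
  else 7

-- chr(v): exact for 0 ≤ v < 0x110000 and v not a surrogate code (Pre_ guarantees this;
-- elsewhere Python raises ValueError or the code point is not a Lean Char).
def pvChr (v : Int) : Char := Char.ofNat v.toNat

def ascii_from_base_n (digits : List Int) (base : Int) : String :=
  let n := pvDigitsPerChar base
  let chars := (PySem.List.pyRange 0 digits.length n).foldl
    (fun chars i =>
      let chunk := PySem.List.slice digits (some i) (some (i + (n : Int)))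
      let value := chunk.foldl (fun value d => value * base + d) 0
      chars ++ [pvChr value]) ([] : List Char)
  String.ofList chars

-- ===== PORT B =====
def ascii_from_base_n_alt (digits : List Int) (base : Int) : String :=
  let n := pvDigitsPerChar base
  let s := digits.foldl
    (fun (st : List Char × Int × Nat) d =>
      let value := st.2.1 * base + d
      let count := st.2.2 + 1
      if count = n then (st.1 ++ [pvChr value], 0, 0) else (st.1, value, count))
    (([] : List Char), (0 : Int), (0 : Nat))
  String.ofList (if s.2.2 ≠ 0 then s.1 ++ [pvChr s.2.1] else s.1)

-- ===== PRECONDITION & SPEC =====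
-- helpers for Pre_ only: the chunk grouping and the Horner value each chunk feeds to chr
def pvHorner (base : Int) (c : List Int) : Int := c.foldl (fun v d => v * base + d) 0

-- Pre_: base ≥ 2 (Python raises on base ≤ 1) and, for each of the ⌈len/n⌉ chunks digits[n*k : n*k+n],
-- its base-`base` Horner value (the argument chr receives) is in range — Python raises ValueError
-- outside [0, 0x110000). It also excludes surrogate code points [0xD800, 0xE000), on which Python A
-- returns a lone-surrogate string that is not representable as a Lean Char.
def Pre_ascii_from_base_n (digits : List Int) (base : Int) : Prop :=
  2 ≤ base ∧ ∀ k < (digits.length + pvDigitsPerChar base - 1) / pvDigitsPerChar base,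
    0 ≤ pvHorner base ((digits.drop (pvDigitsPerChar base * k)).take (pvDigitsPerChar base)) ∧
    pvHorner base ((digits.drop (pvDigitsPerChar base * k)).take (pvDigitsPerChar base)) < 1114112 ∧
    ¬ (55296 ≤ pvHorner base ((digits.drop (pvDigitsPerChar base * k)).take (pvDigitsPerChar base)) ∧
       pvHorner base ((digits.drop (pvDigitsPerChar base * k)).take (pvDigitsPerChar base)) < 57344)
instance (digits : List Int) (base : Int) : Decidable (Pre_ascii_from_base_n digits base) := by
  unfold Pre_ascii_from_base_n; infer_instance

def pvWitness_ascii_from_base_n : List Int × Int := ([1, 0, 0, 0, 0, 0, 1, 1, 0, 0, 0, 0, 1, 0], 2)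

def Spec_ascii_from_base_n (digits : List Int) (base : Int) (out : String) : Prop := out = ascii_from_base_n_alt digits base
instance (digits : List Int) (base : Int) (out : String) : Decidable (Spec_ascii_from_base_n digits base out) := by unfold Spec_ascii_from_base_n; infer_instance

-- ===== CLAIM (what is proved, stated in full; the proofs are below) =====
def Claim_equal_ascii_from_base_n : Prop := ∀ (digits : List Int) (base : Int), Dom_ascii_from_base_n digits base → Pre_ascii_from_base_n digits base → Spec_ascii_from_base_n digits base (ascii_from_base_n digits base)

-- ===== LEMMAS AND PROOFS =====

theorem pvDigitsPerChar_pos (base : Int) : 1 ≤ pvDigitsPerChar base := by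
  unfold pvDigitsPerChar; split_ifs <;> decide

-- proof-side twin of pvChunks, by well-founded recursion (handier induction principle)
def pvChunksR (n : Nat) : List Int → List (List Int)
  | [] => []
  | d :: rest => (d :: rest.take (n - 1)) :: pvChunksR n (rest.drop (n - 1))
termination_by l => l.length
decreasing_by simp

-- the common rendering both ports compute
def pvRender (n : Nat) (base : Int) (ds : List Int) : List Char :=
  (pvChunksR n ds).map (fun c => pvChr (pvHorner base c))

-- chunk head/tail as take/drop (n ≥ 1)
theorem pvChunks_cons (n : Nat) (hn : 1 ≤ n) (d : Int) (rest : List Int) :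
    pvChunksR n (d :: rest) = (d :: rest).take n :: pvChunksR n ((d :: rest).drop n) := by
  obtain ⟨m, rfl⟩ : ∃ m, n = m + 1 := ⟨n - 1, by omega⟩
  rw [pvChunksR]
  simp

theorem pvCount_zero (n : Nat) (hn : 1 ≤ n) : (0 + n - 1) / n = 0 :=
  Nat.div_eq_of_lt (by omega)

theorem pvCount_succ (L n : Nat) (hn : 1 ≤ n) (hL : 1 ≤ L) :
    (L + n - 1) / n = (L - 1) / n + 1 := by
  have h : L + n - 1 = (L - 1) + n := by omega
  rw [h, Nat.add_div_right _ (by omega)]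

-- the Int chunk count A's pyRange produces, in Nat form
theorem pvCount_int (L n : Nat) (hn : 1 ≤ n) :
    (if (0 : Int) < (L : Int) then (((L : Int) - 0 + n - 1) / n).toNat else 0)
      = (L + n - 1) / n := by
  rcases Nat.eq_zero_or_pos L with h | h
  · subst h
    rw [if_neg (by simp), pvCount_zero n hn]
  · rw [if_pos (by exact_mod_cast h)]
    have h1 : ((L : Int) - 0 + n - 1) = ((L + n - 1 : Nat) : Int) := by omega
    have h2 : ((L + n - 1 : Nat) : Int) / (n : Int) = (((L + n - 1) / n : Nat) : Int) := by
      exact_mod_cast rfl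
    rw [h1, h2, Int.toNat_natCast]

-- A's per-chunk map over the range of chunk starts equals the common rendering
theorem pvRangeMap_eq_render (base : Int) (n : Nat) (hn : 1 ≤ n) (ds : List Int) :
    (List.range ((ds.length + n - 1) / n)).map
        (fun k => pvChr (pvHorner base ((ds.drop (n * k)).take n)))
      = pvRender n base ds := by
  induction ds using pvChunksR.induct n with
  | case1 => simp [pvRender, pvChunksR]; omega
  | case2 d rest ih =>
    rw [pvCount_succ _ _ hn (by simp), List.range_succ_eq_map, List.map_cons, List.map_map]
    rw [pvRender, pvChunks_cons n hn, List.map_cons, ← pvRender]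
    refine congrArg₂ _ (by simp) ?_
    have hdrop : (d :: rest).drop n = rest.drop (n - 1) := by
      obtain ⟨m, rfl⟩ : ∃ m, n = m + 1 := ⟨n - 1, by omega⟩
      simp
    rw [List.length_cons, Nat.add_sub_cancel, hdrop, ← ih]
    have hcnt : ((rest.drop (n - 1)).length + n - 1) / n = rest.length / n := by
      rw [List.length_drop]
      rcases Nat.lt_or_ge rest.length (n - 1) with hlt | hle
      · rw [Nat.div_eq_of_lt (by omega), Nat.div_eq_of_lt (by omega)]
      · congr 1; omega
    rw [hcnt]
    refine List.map_congr_left (fun k _ => ?_)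
    simp only [Function.comp]
    rw [← hdrop, List.drop_drop, show n + n * k = n * Nat.succ k by rw [Nat.mul_succ]; omega]

-- PORT A computes the common rendering
theorem pvLemA (digits : List Int) (base : Int) :
    ascii_from_base_n digits base
      = String.ofList (pvRender (pvDigitsPerChar base) base digits) := by
  have hn : 1 ≤ pvDigitsPerChar base := pvDigitsPerChar_pos base
  simp only [ascii_from_base_n]
  rw [PySem.List.foldl_append_singleton_eq_map, PySem.List.pyRange_of_pos 0 digits.length
    (s := (pvDigitsPerChar base : Int)) (by exact_mod_cast hn)]
  rw [List.map_map]
  congr 1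
  rw [← pvRangeMap_eq_render base _ hn digits,
    ← pvCount_int digits.length (pvDigitsPerChar base) hn]
  refine List.map_congr_left (fun k _ => ?_)
  simp only [Function.comp]
  have hidx : (0 : Int) + (pvDigitsPerChar base : Int) * (k : Int)
      = ((pvDigitsPerChar base * k : Nat) : Int) := by push_cast; ring
  rw [hidx, show ((pvDigitsPerChar base * k : Nat) : Int) + (pvDigitsPerChar base : Int)
        = ((pvDigitsPerChar base * k : Nat) : Int) + ((pvDigitsPerChar base : Nat) : Int) from rfl,
    PySem.List.slice_natCast_add digits (pvDigitsPerChar base * k) (pvDigitsPerChar base)]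
  rfl

-- B's flat step function (the fold body of the port, lets reduced)
def pvStepB (base : Int) (n : Nat) (st : List Char × Int × Nat) (d : Int) :
    List Char × Int × Nat :=
  if st.2.2 + 1 = n then (st.1 ++ [pvChr (st.2.1 * base + d)], 0, 0)
  else (st.1, st.2.1 * base + d, st.2.2 + 1)

-- a full chunk (counter reaches n exactly at its last digit) emits one char and resets
theorem pvStepFull (base : Int) (n : Nat) :
    ∀ (c : List Int), c ≠ [] → ∀ (chars : List Char) (v : Int) (cnt : Nat),
      cnt + c.length = n →
      c.foldl (pvStepB base n) (chars, v, cnt)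
        = (chars ++ [pvChr (c.foldl (fun a d => a * base + d) v)], 0, 0) := by
  intro c
  induction c with
  | nil => intro h; exact absurd rfl h
  | cons d rest ih =>
    intro _ chars v cnt hlen
    cases rest with
    | nil =>
      have h1 : cnt + 1 = n := by simpa using hlen
      simp [pvStepB, h1]
    | cons e tl =>
      have h1 : cnt + (tl.length + 2) = n := by simpa [Nat.add_assoc] using hlen
      have hne : cnt + 1 ≠ n := by omega
      rw [List.foldl_cons,
        show pvStepB base n (chars, v, cnt) d = (chars, v * base + d, cnt + 1) from by
          simp [pvStepB, hne]]
      exact ih (by simp) chars (v * base + d) (cnt + 1) (by simp; omega)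

-- a partial run (counter never reaches n) just accumulates
theorem pvStepPartial (base : Int) (n : Nat) :
    ∀ (c : List Int) (chars : List Char) (v : Int) (cnt : Nat),
      cnt + c.length < n →
      c.foldl (pvStepB base n) (chars, v, cnt)
        = (chars, c.foldl (fun a d => a * base + d) v, cnt + c.length) := by
  intro c
  induction c with
  | nil => intro chars v cnt _; simp
  | cons d rest ih =>
    intro chars v cnt hlen
    simp only [List.length_cons] at hlen
    have hne : cnt + 1 ≠ n := by omega
    rw [List.foldl_cons,
      show pvStepB base n (chars, v, cnt) d = (chars, v * base + d, cnt + 1) from by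
        simp [pvStepB, hne]]
    rw [ih chars (v * base + d) (cnt + 1) (by omega)]
    simp only [List.foldl_cons, List.length_cons]
    refine congrArg _ (congrArg _ ?_)
    omega

-- PORT B's flat fold plus finalizer computes the common rendering
theorem pvLemB_go (base : Int) (n : Nat) (hn : 1 ≤ n) :
    ∀ (ds : List Int) (chars : List Char),
      (let s := ds.foldl (pvStepB base n) (chars, 0, 0);
        if s.2.2 ≠ 0 then s.1 ++ [pvChr s.2.1] else s.1)
      = chars ++ pvRender n base ds := by
  intro ds
  induction ds using pvChunksR.induct n with
  | case1 => intro chars; simp [pvRender, pvChunksR]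
  | case2 d rest ih =>
    intro chars
    have hL : (d :: rest).length = rest.length + 1 := rfl
    have hdrop : (d :: rest).drop n = rest.drop (n - 1) := by
      obtain ⟨m, rfl⟩ : ∃ m, n = m + 1 := ⟨n - 1, by omega⟩
      simp
    rw [pvRender, pvChunks_cons n hn, List.map_cons, ← pvRender]
    rcases lt_or_ge (d :: rest).length n with hlt | hge
    · simp only
      rw [pvStepPartial base n (d :: rest) chars 0 0 (by omega)]
      simp only [Nat.zero_add]
      rw [if_pos (by simp)]
      have h1 : (d :: rest).drop n = [] := List.drop_eq_nil_of_le (by omega)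
      have h2 : (d :: rest).take n = d :: rest := List.take_of_length_le (by omega)
      rw [h1, h2]
      simp [pvRender, pvChunksR, pvHorner]
    · simp only
      conv_lhs => rw [← List.take_append_drop n (d :: rest)]
      rw [List.foldl_append]
      rw [pvStepFull base n ((d :: rest).take n)
        (by simp [List.take_eq_nil_iff]; omega) chars 0 0
        (by simp [List.length_take]; omega)]
      rw [hdrop]
      have := ih (chars ++ [pvChr (((d :: rest).take n).foldl (fun a d => a * base + d) 0)])
      simp only at this
      rw [this, List.append_assoc]
      rfl

theorem pvLemB (digits : List Int) (base : Int) :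
    ascii_from_base_n_alt digits base
      = String.ofList (pvRender (pvDigitsPerChar base) base digits) := by
  have hn : 1 ≤ pvDigitsPerChar base := pvDigitsPerChar_pos base
  simp only [ascii_from_base_n_alt]
  congr 1
  have h := pvLemB_go base (pvDigitsPerChar base) hn digits []
  simpa [pvStepB] using h

-- ===== VERDICT (by name: the statement is the Claim_ definition above) =====
theorem ascii_from_base_n_spec : Claim_equal_ascii_from_base_n := by
  intro digits base _ _
  unfold Spec_ascii_from_base_n
  rw [pvLemA digits base, pvLemB digits base]
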